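-- pv_equiv track=rewrite | github.com/sp8cky/Primes | src/primality/helpers.py | is_mersenne_number
-- ===== SOURCE A (Python) =====
-- def is_mersenne_number(n: int) -> bool:
--     if n <= 1: return False
--     m = n + 1  # M_p + 1 = 2^p
--     p = 0
--     while m > 1:
--         if m % 2 != 0:
--             return False
--         m = m // 2
--         p += 1
--     return p >= 2
-- ===== SOURCE B (Python) =====
-- def is_mersenne_number(n: int) -> bool:
--     m = n + 1
--     return m >= 4 and (m & (m - 1)) == 0
-- ===== Notes on version B (the rewrite author's own statement) =====
-- stated objective: simpler
-- what changed: Replaced the iterative divide-by-two loop that counts the exponent with a single closed-form bitwise power-of-two test on the successor of the input.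
import Mathlib
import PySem

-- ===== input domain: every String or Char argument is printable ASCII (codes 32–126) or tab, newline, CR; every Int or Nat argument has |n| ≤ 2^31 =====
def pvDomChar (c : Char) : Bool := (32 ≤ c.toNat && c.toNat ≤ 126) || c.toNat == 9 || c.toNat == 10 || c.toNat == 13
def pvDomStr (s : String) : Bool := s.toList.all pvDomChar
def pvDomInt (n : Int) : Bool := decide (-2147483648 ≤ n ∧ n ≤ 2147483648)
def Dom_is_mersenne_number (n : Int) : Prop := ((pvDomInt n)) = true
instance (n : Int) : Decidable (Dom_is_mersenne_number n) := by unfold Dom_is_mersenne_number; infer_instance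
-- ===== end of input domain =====

-- B replaces A's iterative divide-by-2 exponent-counting loop with a closed-form
-- bitwise power-of-two test on n+1 (simpler).

-- ===== PORT A =====
-- the 'while m > 1' loop of A, carrying the state (m, p)
def mersLoop (m p : Int) : Bool :=
  if m > 1 then
    if PySem.Int.mod m 2 ≠ 0 then false
    else mersLoop (PySem.Int.floordiv m 2) (p + 1)
  else decide (p ≥ 2)
termination_by m.toNat
decreasing_by
  rw [PySem.Int.floordiv_eq_ediv_of_pos (by omega : (0:Int) < 2)]
  omega

def is_mersenne_number (n : Int) : Bool :=
  if n ≤ 1 then false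
  else mersLoop (n + 1) 0

-- ===== PORT B =====
def is_mersenne_number_alt (n : Int) : Bool :=
  let m := n + 1
  decide (m ≥ 4) && decide (PySem.Int.band m (m - 1) = 0)

-- ===== PRECONDITION & SPEC =====
def Spec_is_mersenne_number (n : Int) (out : Bool) : Prop := out = is_mersenne_number_alt n
instance (n : Int) (out : Bool) : Decidable (Spec_is_mersenne_number n out) := by unfold Spec_is_mersenne_number; infer_instance

-- ===== CLAIM (what is proved, stated in full; the proofs are below) =====
def Claim_equal_is_mersenne_number : Prop := ∀ (n : Int), Dom_is_mersenne_number n → Spec_is_mersenne_number n (is_mersenne_number n)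

-- ===== LEMMAS AND PROOFS =====

theorem land_even_odd (a b : Nat) : (2 * a) &&& (2 * b + 1) = 2 * (a &&& b) := by
  simpa [Nat.bit] using Nat.land_bit false a true b

theorem land_odd_even (a b : Nat) : (2 * a + 1) &&& (2 * b) = 2 * (a &&& b) := by
  simpa [Nat.bit] using Nat.land_bit true a false b

-- Nat bit trick: for m ≥ 1, m &&& (m-1) = 0 iff m is a power of two.
theorem land_pred_eq_zero_iff (m : Nat) (hm : 1 ≤ m) :
    (m &&& (m - 1) = 0) ↔ ∃ k : Nat, m = 2 ^ k := by
  induction m using Nat.strong_induction_on with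
  | _ m ih =>
    rcases Nat.even_or_odd m with ⟨m', hm'⟩ | ⟨m', hm'⟩
    · -- m = 2 * m' even, m' ≥ 1
      have hm1 : 1 ≤ m' := by omega
      have e : m &&& (m - 1) = 2 * (m' &&& (m' - 1)) := by
        have e2 : m - 1 = 2 * (m' - 1) + 1 := by omega
        have e1 : m = 2 * m' := by omega
        rw [e2, e1, land_even_odd]
      rw [e]
      have hrec := ih m' (by omega) hm1
      constructor
      · intro h
        rcases hrec.mp (by omega) with ⟨k, hk⟩
        exact ⟨k + 1, by rw [pow_succ]; omega⟩
      · rintro ⟨k, hk⟩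
        have hk0 : k ≠ 0 := by rintro rfl; omega
        have hm'' : m' = 2 ^ (k - 1) := by
          have : (2:Nat) ^ k = 2 ^ (k - 1) * 2 := by
            rw [← pow_succ]; congr 1; omega
          omega
        have := hrec.mpr ⟨k - 1, hm''⟩
        omega
    · -- m = 2 * m' + 1 odd
      rcases Nat.eq_zero_or_pos m' with rfl | hm1
      · -- m = 1
        have : m = 1 := by omega
        subst this
        exact ⟨fun _ => ⟨0, rfl⟩, fun _ => by decide⟩
      · -- m odd ≥ 3: land = 2*m' ≠ 0 and m not a power of two
        have e : m &&& (m - 1) = 2 * (m' &&& m') := by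
          have e1 : m = 2 * m' + 1 := by omega
          have e2 : m - 1 = 2 * m' := by omega
          rw [e2, e1, land_odd_even]
        rw [e, Nat.and_self]
        constructor
        · omega
        · rintro ⟨k, hk⟩
          have hk0 : k ≠ 0 := by rintro rfl; omega
          have : 2 ∣ m := hk ▸ dvd_pow_self 2 hk0
          omega

-- the loop returns true iff m = 2^k with p + k ≥ 2 (for m ≥ 1)
theorem mersLoop_char (N : Nat) : ∀ m : Int, m.toNat = N → 1 ≤ m → ∀ p : Int,
    (mersLoop m p = true ↔ ∃ k : Nat, m = 2 ^ k ∧ p + k ≥ 2) := by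
  induction N using Nat.strong_induction_on with
  | _ N ih =>
    intro m hN hm p
    rw [mersLoop]
    by_cases h1 : m > 1
    · simp only [h1, if_pos]
      have h2 : PySem.Int.floordiv m 2 = m / 2 :=
        PySem.Int.floordiv_eq_ediv_of_pos (by omega)
      have hmod : PySem.Int.mod m 2 = m % 2 :=
        PySem.Int.mod_eq_emod_of_pos (by omega)
      by_cases hodd : m % 2 = 0
      · simp only [hmod, hodd, ne_eq, not_true_eq_false, if_false]
        rw [h2]
        rw [ih (m / 2).toNat (by omega) (m / 2) rfl (by omega) (p + 1)]
        constructor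
        · rintro ⟨k, hk, hpk⟩
          refine ⟨k + 1, by rw [pow_succ]; omega, by push_cast; omega⟩
        · rintro ⟨k, hk, hpk⟩
          have hk0 : k ≠ 0 := by
            rintro rfl; simp at hk; omega
          have hpow : (2:Int) ^ k = 2 ^ (k - 1) * 2 := by
            rw [← pow_succ]; congr 1; omega
          refine ⟨k - 1, by omega, by omega⟩
      · simp only [hmod, hodd, ne_eq, not_false_eq_true, if_true]
        constructor
        · intro h; exact absurd h (by simp)
        · rintro ⟨k, hk, -⟩
          have hk0 : k ≠ 0 := by rintro rfl; simp at hk; omega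
          have : (2:Int) ^ k = 2 ^ (k - 1) * 2 := by
            rw [← pow_succ]; congr 1; omega
          omega
    · simp only [h1, if_neg, not_false_eq_true]
      have hm1 : m = 1 := by omega
      subst hm1
      simp only [decide_eq_true_eq]
      constructor
      · intro h
        exact ⟨0, by norm_num, by omega⟩
      · rintro ⟨k, hk, hpk⟩
        have hk0 : k = 0 := by
          by_contra hk0
          have : (2:Int) ^ k = 2 ^ (k - 1) * 2 := by
            rw [← pow_succ]; congr 1; omega
          have := pow_pos (by norm_num : (0:Int) < 2) (k - 1)
          omega
        subst hk0
        simp at hk hpk ⊢; omega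

-- ===== VERDICT (by name: the statement is the Claim_ definition above) =====
theorem is_mersenne_number_spec : Claim_equal_is_mersenne_number := by
  intro n _
  unfold Spec_is_mersenne_number is_mersenne_number is_mersenne_number_alt
  by_cases hn : n ≤ 1
  · simp only [hn, if_pos]
    have : ¬ (n + 1 ≥ 4) := by omega
    simp [this]
  · simp only [hn, if_neg, not_false_eq_true]
    have hm : 1 ≤ n + 1 := by omega
    rw [Bool.eq_iff_iff]
    rw [mersLoop_char (n + 1).toNat (n + 1) rfl hm 0]
    have hband : PySem.Int.band (n + 1) (n + 1 - 1) = (((n + 1).toNat &&& ((n + 1).toNat - 1) : Nat) : Int) := by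
      rw [PySem.Int.band_of_nonneg (by omega) (by omega)]
      congr 2
      omega
    simp only [Bool.and_eq_true, decide_eq_true_eq, hband, Int.natCast_eq_zero]
    rw [land_pred_eq_zero_iff (n + 1).toNat (by omega)]
    have hcast : ∀ k : Nat, (n + 1 = (2:Int) ^ k ↔ (n + 1).toNat = 2 ^ k) := by
      intro k
      have := pow_pos (by norm_num : (0:Int) < 2) k
      have hc : ((2:Nat)^k : Int) = (2:Int)^k := by push_cast; ring
      omega
    constructor
    · rintro ⟨k, hk, hpk⟩
      have hk2 : 2 ≤ k := by omega
      have hle : (2:Int) ^ 2 ≤ 2 ^ k := pow_le_pow_right₀ (by norm_num) hk2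
      refine ⟨by norm_num at hle; omega, k, (hcast k).mp hk⟩
    · rintro ⟨h4, k, hk⟩
      have hk' := (hcast k).mpr hk
      refine ⟨k, hk', ?_⟩
      by_contra hlt
      have : k = 0 ∨ k = 1 := by omega
      rcases this with rfl | rfl <;> norm_num at hk' <;> omega
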